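-- pv_equiv track=rewrite | github.com/skehg/Xrev-pyRevit | pyXrev Project Tools.tab/Family Management.panel/Create Edit Parameters.pushbutton/script.py | _format_chain_tree
-- ===== SOURCE A (Python) =====
-- def _format_chain_tree(start_name, children_of):
--     """Render the dependency tree as a recursive box-draw hierarchy.
--
--     Example (Param1 -> [Param2, Param5], Param2 -> [Param3], Param3 -> [Param4], Param5 -> [Param6]):
--         'Param1'
--         |- 'Param2'
--         |  |- 'Param3'
--         |  |  |- 'Param4'
--         |- 'Param5'
--            |- 'Param6'
--     """
--     lines = []
--     lines.append(u"'{}'".format(start_name))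
--
--     def _render_children(parent, continuation):
--         children = children_of.get(parent, [])
--         for i, child in enumerate(children):
--             is_last = (i == len(children) - 1)
--             connector  = u"\u2514\u2500 " if is_last else u"\u251c\u2500 "
--             child_cont = continuation + (u"   " if is_last else u"\u2502  ")
--             lines.append(u"{}{}'{}'".format(continuation, connector, child))
--             _render_children(child, child_cont)
--
--     _render_children(start_name, u"")
--     return u"\n".join(lines)
-- ===== SOURCE B (Python) =====
-- def _format_chain_tree(start_name, children_of):
--     """Compositional rendering: each subtree is rendered unprefixed, then its
--     lines are padded by the parent, instead of threading a continuation down."""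
--     def _block(name):
--         lines = []
--         kids = list(children_of.get(name, []))
--         while kids:
--             child = kids.pop(0)
--             last = not kids
--             lines.append((u"\u2514\u2500 " if last else u"\u251c\u2500 ") + u"'%s'" % child)
--             pad = u"   " if last else u"\u2502  "
--             for sub in _block(child):
--                 lines.append(pad + sub)
--         return lines
--
--     return u"\n".join([u"'%s'" % start_name] + _block(start_name))
-- ===== Notes on version B (the rewrite author's own statement) =====
-- stated objective: alternative
-- what changed: B renders each subtree bottom-up with no continuation argument (each node's block is built unprefixed and the parent pads its child's lines afterwards), replacing A's top-down threading of a continuation string and its enumerate/is_last index bookkeeping; Pre_ excludes children_of graphs with a cycle reachable from start_name, on which A raises RecursionError (B recurses there too).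
import Mathlib
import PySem

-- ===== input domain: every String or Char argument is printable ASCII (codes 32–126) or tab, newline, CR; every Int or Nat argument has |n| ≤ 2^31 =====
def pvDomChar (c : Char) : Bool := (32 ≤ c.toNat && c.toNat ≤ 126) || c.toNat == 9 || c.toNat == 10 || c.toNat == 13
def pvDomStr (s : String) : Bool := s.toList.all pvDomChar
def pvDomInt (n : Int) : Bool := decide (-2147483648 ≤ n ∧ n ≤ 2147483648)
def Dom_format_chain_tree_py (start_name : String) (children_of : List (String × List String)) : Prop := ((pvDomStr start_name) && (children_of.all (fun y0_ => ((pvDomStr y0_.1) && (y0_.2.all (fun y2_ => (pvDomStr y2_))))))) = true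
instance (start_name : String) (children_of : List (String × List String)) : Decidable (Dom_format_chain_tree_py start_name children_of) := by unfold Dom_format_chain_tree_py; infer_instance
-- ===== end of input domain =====

-- B renders each subtree unprefixed and pads child lines afterwards, instead of A's
-- top-down continuation threading with enumerate/is_last bookkeeping (objective: alternative).

-- ===== PORT A =====
-- A's inner recursion `_render_children`, with a fuel argument making the Lean function
-- total; fuel = children_of.length + 2 bounds the recursion depth on every input Pre_ admits
-- (on acyclic-reachable graphs a chain of nested calls visits distinct keys).
def pvRenderA (cof : List (String × List String)) : Nat → String → List Char → List (List Char)
  | 0, _, _ => []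
  | fuel+1, parent, cont =>
    let children := (PySem.Dict.mk cof).getD parent []
    (PySem.List.enumerate children 0).foldl
      (fun lines ic =>
        let isLast := ic.1 == (children.length : Int) - 1
        let connector := if isLast then "└─ ".toList else "├─ ".toList
        let childCont := cont ++ (if isLast then "   ".toList else "│  ".toList)
        lines ++ [cont ++ connector ++ ('\'' :: ic.2.toList ++ ['\''])] ++ pvRenderA cof fuel ic.2 childCont)
      []

def format_chain_tree_py (start_name : String) (children_of : List (String × List String)) : String :=
  String.ofList (PySem.Chars.join "\n".toList
    (('\'' :: start_name.toList ++ ['\'']) :: pvRenderA children_of (children_of.length + 2) start_name []))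

-- ===== PORT B =====
-- B's `_block` (render children of a node, unprefixed) and its kids loop, fueled the same way.
mutual
def pvBlockB (cof : List (String × List String)) : Nat → String → List (List Char)
  | 0, _ => []
  | fuel+1, name => pvKidsB cof fuel ((PySem.Dict.mk cof).getD name [])
termination_by fuel _ => (fuel, 0)

def pvKidsB (cof : List (String × List String)) (fuel : Nat) : List String → List (List Char)
  | [] => []
  | child :: rest =>
    let last := rest.isEmpty
    ((if last then "└─ ".toList else "├─ ".toList) ++ ('\'' :: child.toList ++ ['\'']))
      :: ((pvBlockB cof fuel child).map (fun sub => (if last then "   ".toList else "│  ".toList) ++ sub)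
          ++ pvKidsB cof fuel rest)
termination_by kids => (fuel, kids.length + 1)
end

def format_chain_tree_py_alt (start_name : String) (children_of : List (String × List String)) : String :=
  String.ofList (PySem.Chars.join "\n".toList
    (('\'' :: start_name.toList ++ ['\'']) :: pvBlockB children_of (children_of.length + 2) start_name))

-- ===== PRECONDITION & SPEC =====
-- Pre_ excludes exactly the inputs with a cycle in children_of reachable from start_name:
-- there Python A raises RecursionError (and B recurses forever too), so A returns no value.
def pvSucc (cof : List (String × List String)) (x : String) : List String :=
  (PySem.Dict.mk cof).getD x []

def pvClosure (cof : List (String × List String)) : Nat → List String → List String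
  | 0, s => s
  | n+1, s => pvClosure cof n ((s ++ s.flatMap (pvSucc cof)).dedup)

def pvAcyclic (cof : List (String × List String)) (start : String) : Bool :=
  (pvClosure cof (cof.length + 1) [start]).all
    (fun x => !((pvClosure cof (cof.length + 1) (pvSucc cof x)).contains x))

def Pre_format_chain_tree_py (start_name : String) (children_of : List (String × List String)) : Prop :=
  pvAcyclic children_of start_name = true
instance (start_name : String) (children_of : List (String × List String)) : Decidable (Pre_format_chain_tree_py start_name children_of) := by unfold Pre_format_chain_tree_py; infer_instance

def pvWitness_format_chain_tree_py : String × (List (String × List String)) :=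
  ("Param1", [("Param1", ["Param2", "Param5"]), ("Param2", ["Param3"])])

def Spec_format_chain_tree_py (start_name : String) (children_of : List (String × List String)) (out : String) : Prop := out = format_chain_tree_py_alt start_name children_of
instance (start_name : String) (children_of : List (String × List String)) (out : String) : Decidable (Spec_format_chain_tree_py start_name children_of out) := by unfold Spec_format_chain_tree_py; infer_instance

-- ===== CLAIM (what is proved, stated in full; the proofs are below) =====
def Claim_equal_format_chain_tree_py : Prop := ∀ (start_name : String) (children_of : List (String × List String)), Dom_format_chain_tree_py start_name children_of → Pre_format_chain_tree_py start_name children_of → Spec_format_chain_tree_py start_name children_of (format_chain_tree_py start_name children_of)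

-- ===== LEMMAS AND PROOFS =====

theorem pvWitness_valid :
    Dom_format_chain_tree_py pvWitness_format_chain_tree_py.1 pvWitness_format_chain_tree_py.2 ∧
    Pre_format_chain_tree_py pvWitness_format_chain_tree_py.1 pvWitness_format_chain_tree_py.2 := by
  decide

-- A's continuation-threaded rendering equals B's unprefixed block, prefixed afterwards,
-- for every fuel (so in particular for the common fuel both ports use).
theorem pvRenderA_eq_map_blockB (cof : List (String × List String)) :
    ∀ (fuel : Nat) (parent : String) (cont : List Char),
      pvRenderA cof fuel parent cont = (pvBlockB cof fuel parent).map (fun l => cont ++ l) := by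
  intro fuel
  induction fuel with
  | zero => intro parent cont; simp [pvRenderA, pvBlockB]
  | succ fuel ih =>
    intro parent cont
    rw [pvRenderA, pvBlockB]
    generalize (PySem.Dict.mk cof).getD parent [] = kids
    have key : ∀ (ks : List String) (s : Int) (acc : List (List Char)),
        s + ks.length = (kids.length : Int) →
        (PySem.List.enumerate ks s).foldl
          (fun lines ic =>
            let isLast := ic.1 == (kids.length : Int) - 1
            let connector := if isLast then "└─ ".toList else "├─ ".toList
            let childCont := cont ++ (if isLast then "   ".toList else "│  ".toList)
            lines ++ [cont ++ connector ++ ('\'' :: ic.2.toList ++ ['\''])] ++ pvRenderA cof fuel ic.2 childCont)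
          acc
        = acc ++ (pvKidsB cof fuel ks).map (fun l => cont ++ l) := by
      intro ks
      induction ks with
      | nil => intro s acc _; simp [pvKidsB]
      | cons child rest ihk =>
        intro s acc hs
        rw [PySem.List.enumerate_cons, List.foldl_cons, ihk (s + 1) _ (by simp only [List.length_cons] at hs; push_cast at hs ⊢; omega)]
        rw [pvKidsB]
        rcases rest with _ | ⟨r, rs⟩
        · have hlast : (s == (kids.length : Int) - 1) = true := by
            simp only [beq_iff_eq]; simp only [List.length_cons, List.length_nil] at hs; push_cast at hs; omega
          simp only [hlast, List.isEmpty_nil, ih, List.map_cons, List.map_map, List.map_append,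
            pvKidsB, List.map_nil]
          simp [Function.comp_def, List.append_assoc]
        · have hlast : (s == (kids.length : Int) - 1) = false := by
            simp only [beq_eq_false_iff_ne]; simp only [List.length_cons] at hs; push_cast at hs; omega
          simp only [hlast, List.isEmpty_cons, ih, List.map_cons, List.map_map, List.map_append]
          simp [Function.comp_def, List.append_assoc]
    have := key kids 0 [] (by omega)
    simpa using this

-- ===== VERDICT (by name: the statement is the Claim_ definition above) =====
theorem format_chain_tree_py_spec : Claim_equal_format_chain_tree_py := by
  intro start_name children_of _ _
  unfold Spec_format_chain_tree_py format_chain_tree_py format_chain_tree_py_alt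
  rw [pvRenderA_eq_map_blockB]
  simp
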